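-- pv_equiv track=rewrite | github.com/tsuru7/algorithm-study | AtCoder/ABC/201-300/ABC238/B.py | solve
-- ===== SOURCE A (Python) =====
-- def solve(n,a):
--     kirikomi = [0]
--     k = 0
--     for i in range(n):
--         k += a[i]
--         k %= 360
--         kirikomi.append(k)
--     kirikomi.append(360)
--     kirikomi = list(set(kirikomi))
--     kirikomi.sort()
--     ans = 0
--     for i in range(1, len(kirikomi)):
--         ans = max(ans, kirikomi[i] - kirikomi[i-1])
--
--     return ans
-- ===== SOURCE B (Python) =====
-- def solve(n, a):
--     # successor search: for each cut, its gap is (smallest larger cut) - cut; no sort needed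
--     cuts = {0, 360}
--     k = 0
--     for i in range(n):
--         k = (k + a[i]) % 360
--         cuts.add(k)
--     ans = 0
--     for c in cuts:
--         nxt = min((d for d in cuts if d > c), default=None)
--         if nxt is not None:
--             ans = max(ans, nxt - c)
--     return ans
-- ===== Notes on version B (the rewrite author's own statement) =====
-- stated objective: alternative
-- what changed: replaces the dedup+sort+adjacent-diff pipeline by a sort-free successor search: for each cut position take the minimum of the strictly larger cut positions as its neighbour and maximise those neighbour distances
import Mathlib
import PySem

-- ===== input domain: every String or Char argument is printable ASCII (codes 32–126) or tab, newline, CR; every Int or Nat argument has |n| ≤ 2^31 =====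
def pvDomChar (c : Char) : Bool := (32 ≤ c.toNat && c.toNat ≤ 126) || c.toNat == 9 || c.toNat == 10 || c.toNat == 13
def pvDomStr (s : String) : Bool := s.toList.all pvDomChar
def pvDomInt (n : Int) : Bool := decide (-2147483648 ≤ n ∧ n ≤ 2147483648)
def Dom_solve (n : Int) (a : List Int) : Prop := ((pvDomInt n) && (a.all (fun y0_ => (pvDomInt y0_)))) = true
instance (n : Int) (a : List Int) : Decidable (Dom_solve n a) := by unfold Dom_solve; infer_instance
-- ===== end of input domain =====

-- B replaces A's dedup+sort+adjacent-diff pipeline by a sort-free successor search: each cut's gap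
-- is (minimum of the strictly larger cuts) - cut, and the answer is the maximum of those; same return value.

-- ===== PORT A =====
def solve (n : Int) (a : List Int) : Int :=
  let st := (PySem.List.pyRange 0 n 1).foldl
    (fun (st : List Int × Int) i =>
      let k := PySem.Int.mod (st.2 + PySem.List.pyGetD a i 0) 360
      (st.1 ++ [k], k)) ([0], 0)
  let kirikomi := st.1 ++ [360]
  let kirikomi := PySem.List.sorted (PySem.Set.ofList kirikomi) (fun x => x) false
  (PySem.List.pyRange 1 (kirikomi.length : Int) 1).foldl
    (fun ans i => max ans (PySem.List.pyGetD kirikomi i 0 - PySem.List.pyGetD kirikomi (i - 1) 0)) 0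

-- ===== PORT B =====
def solve_alt (n : Int) (a : List Int) : Int :=
  let st := (PySem.List.pyRange 0 n 1).foldl
    (fun (st : PySem.Set Int × Int) i =>
      let k := PySem.Int.mod (st.2 + PySem.List.pyGetD a i 0) 360
      (PySem.Set.add st.1 k, k)) (PySem.Set.ofList [0, 360], 0)
  st.1.foldl
    (fun ans c =>
      match PySem.List.min? (st.1.filter (fun d => decide (c < d))) (fun x => x) with
      | some nxt => max ans (nxt - c)
      | none => ans) 0

-- ===== PRECONDITION & SPEC =====
-- Pre_ excludes exactly n > len(a), where A raises IndexError reading a[i] (B raises there too).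
def Pre_solve (n : Int) (a : List Int) : Prop := n ≤ (a.length : Int)
instance (n : Int) (a : List Int) : Decidable (Pre_solve n a) := by unfold Pre_solve; infer_instance
def pvWitness_solve : Int × List Int := (2, [90, 180])

def Spec_solve (n : Int) (a : List Int) (out : Int) : Prop := out = solve_alt n a
instance (n : Int) (a : List Int) (out : Int) : Decidable (Spec_solve n a out) := by unfold Spec_solve; infer_instance

-- ===== CLAIM (what is proved, stated in full; the proofs are below) =====
def Claim_equal_solve : Prop := ∀ (n : Int) (a : List Int), Dom_solve n a → Pre_solve n a → Spec_solve n a (solve n a)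

-- ===== LEMMAS AND PROOFS =====

-- the successive running values of k (prefix sums mod 360)
def prefs (k : Int) : List Int → List Int
  | [] => []
  | x :: t => PySem.Int.mod (k + x) 360 :: prefs (PySem.Int.mod (k + x) 360) t

-- B's successor step, read over a cut list S
def succF (S : List Int) (ans c : Int) : Int :=
  match PySem.List.min? (S.filter (fun d => decide (c < d))) (fun x => x) with
  | some nxt => max ans (nxt - c)
  | none => ans

-- 'for i in range(n): … a[i] …' with n ≤ len(a) is a structural fold over the first n elements
theorem foldl_pyRange_take {σ : Type} (F : σ → Int → σ) (a : List Int) (n : Int)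
    (h : n ≤ (a.length : Int)) (init : σ) :
    (PySem.List.pyRange 0 n 1).foldl (fun st i => F st (PySem.List.pyGetD a i 0)) init
      = (a.take n.toNat).foldl F init := by
  by_cases hn : n ≤ 0
  · rw [PySem.List.pyRange_one_eq_nil hn]
    have h0 : n.toNat = 0 := by omega
    simp [h0]
  · rw [not_le] at hn
    have hlen : ((a.take n.toNat).length : Int) = n := by
      simp [List.length_take]; omega
    have hcongr : (PySem.List.pyRange 0 n 1).foldl
        (fun st i => F st (PySem.List.pyGetD a i 0)) init
      = (PySem.List.pyRange 0 n 1).foldl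
        (fun st i => F st (PySem.List.pyGetD (a.take n.toNat) i 0)) init := by
      apply PySem.List.foldl_congr_mem
      intro acc i hi
      rw [PySem.List.mem_pyRange_one] at hi
      have h1 : i < (a.length : Int) := lt_of_lt_of_le hi.2 h
      have h2 : i < ((a.take n.toNat).length : Int) := by rw [hlen]; exact hi.2
      rw [PySem.List.pyGetD_eq_getElem a 0 hi.1 h1,
          PySem.List.pyGetD_eq_getElem _ 0 hi.1 h2, List.getElem_take]
    have hfin := PySem.List.foldl_pyRange_zero_pyGetD' (a.take n.toNat) 0 F init
    rw [hlen] at hfin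
    rw [hcongr, hfin]

-- A's first loop
theorem foldA_eq (t : List Int) : ∀ (init : List Int) (k : Int),
    (t.foldl (fun (st : List Int × Int) x =>
      (st.1 ++ [PySem.Int.mod (st.2 + x) 360], PySem.Int.mod (st.2 + x) 360)) (init, k)).1
      = init ++ prefs k t := by
  induction t with
  | nil => intro init k; simp [prefs]
  | cons x t ih =>
    intro init k
    simp only [List.foldl_cons]
    rw [ih]
    simp [prefs]

-- B's first loop: the set built is {0, 360} updated with the prefix sums
theorem foldB_eq (t : List Int) : ∀ (s : PySem.Set Int) (k : Int),
    (t.foldl (fun (st : PySem.Set Int × Int) x =>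
      (PySem.Set.add st.1 (PySem.Int.mod (st.2 + x) 360), PySem.Int.mod (st.2 + x) 360)) (s, k)).1
      = PySem.Set.update s (prefs k t) := by
  induction t with
  | nil => intro s k; simp [prefs, PySem.Set.update]
  | cons x t ih =>
    intro s k
    simp only [List.foldl_cons]
    rw [ih]
    simp [prefs, PySem.Set.update]

-- min(xs) depends only on the set of elements (key = identity: the Int minimum is unique)
theorem min?_val_eq (l1 l2 : List Int) (hmem : ∀ y, y ∈ l1 ↔ y ∈ l2) :
    PySem.List.min? l1 (fun x => x) = PySem.List.min? l2 (fun x => x) := by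
  cases h1 : PySem.List.min? l1 (fun x => x) with
  | none =>
    rw [PySem.List.min?_eq_none_iff] at h1
    subst h1
    have h2 : l2 = [] := by
      rw [List.eq_nil_iff_forall_not_mem]
      intro y hy
      simpa using (hmem y).2 hy
    rw [h2]
    symm
    rw [PySem.List.min?_eq_none_iff]
  | some m =>
    have hm2 : m ∈ l2 := (hmem m).1 (PySem.List.min?_mem h1)
    cases h2 : PySem.List.min? l2 (fun x => x) with
    | none =>
      rw [PySem.List.min?_eq_none_iff] at h2
      subst h2
      simp at hm2
    | some m' =>
      have hm1' : m' ∈ l1 := (hmem m').2 (PySem.List.min?_mem h2)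
      have a1 : m ≤ m' := PySem.List.min?_isMin h1 m' hm1'
      have a2 : m' ≤ m := PySem.List.min?_isMin h2 m hm2
      simp only [Option.some.injEq]
      omega

-- a running min over a list bounded below by the seed is the seed
theorem foldl_min_of_le (T : List Int) : ∀ (y : Int), (∀ z ∈ T, y ≤ z) → T.foldl min y = y := by
  induction T with
  | nil => intro y _; rfl
  | cons z T ih =>
    intro y h
    simp only [List.foldl_cons]
    rw [min_eq_left (h z (by simp))]
    exact ih y (fun w hw => h w (by simp [hw]))

-- the successor scan over a strictly increasing list IS the adjacent-difference max
theorem succFold : ∀ (S : List Int), S.Pairwise (· < ·) → ∀ (init : Int),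
    S.foldl (succF S) init
      = ((S.drop 1).zip S).foldl (fun ans p => max ans (p.1 - p.2)) init := by
  intro S
  induction S with
  | nil => intro _ init; rfl
  | cons x T ih =>
    intro hp init
    have hxT : ∀ z ∈ T, x < z := fun z hz => (List.pairwise_cons.1 hp).1 z hz
    have hT : T.Pairwise (· < ·) := (List.pairwise_cons.1 hp).2
    have hfilter : (x :: T).filter (fun d => decide (x < d)) = T := by
      simp only [List.filter_cons]
      rw [if_neg (by simp), List.filter_eq_self.2 (fun z hz => by simp [hxT z hz])]
    have hcongr : ∀ (acc : Int), ∀ c ∈ T, succF (x :: T) acc c = succF T acc c := by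
      intro acc c hc
      have hxc : x < c := hxT c hc
      unfold succF
      have hfe : (x :: T).filter (fun d => decide (c < d)) = T.filter (fun d => decide (c < d)) := by
        simp only [List.filter_cons]
        rw [if_neg (by simp only [decide_eq_true_eq]; omega)]
      rw [hfe]
    cases T with
    | nil =>
      simp only [List.foldl_cons, List.foldl_nil, List.drop_succ_cons, List.drop_nil,
        List.zip_nil_left]
      unfold succF
      rw [hfilter]
      rfl
    | cons y T' =>
      have hstep : succF (x :: y :: T') init x = max init (y - x) := by
        unfold succF
        rw [hfilter, PySem.List.min?_id_cons,
          foldl_min_of_le T' y (fun z hz => le_of_lt ((List.pairwise_cons.1 hT).1 z hz))]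
      rw [List.foldl_cons, hstep,
        PySem.List.foldl_congr_mem (y :: T') (succF (x :: y :: T')) (succF (y :: T')) _ hcongr,
        ih hT]
      simp only [List.drop_succ_cons, List.drop_zero, List.zip_cons_cons, List.foldl_cons]

-- A's gap loop over indices = fold over adjacent pairs
theorem gapfoldA (L : List Int) :
    (PySem.List.pyRange 1 (L.length : Int) 1).foldl
      (fun ans i => max ans (PySem.List.pyGetD L i 0 - PySem.List.pyGetD L (i - 1) 0)) 0
    = ((L.drop 1).zip L).foldl (fun ans p => max ans (p.1 - p.2)) 0 := by
  have hmap : (PySem.List.pyRange 1 (L.length : Int) 1).map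
      (fun i => PySem.List.pyGetD L i 0 - PySem.List.pyGetD L (i - 1) 0)
    = ((L.drop 1).zip L).map (fun p => p.1 - p.2) := by
    apply List.ext_getElem
    · simp [PySem.List.length_pyRange_one]
    · intro k h1 h2
      simp only [List.getElem_map, List.getElem_zip, List.getElem_drop]
      rw [PySem.List.getElem_pyRange_one]
      have hk : k < L.length - 1 := by
        simp [PySem.List.length_pyRange_one] at h1; omega
      have e1 : (1 : Int) + (k : Int) = ((k + 1 : Nat) : Int) := by push_cast; ring
      rw [e1]
      rw [show ((k + 1 : Nat) : Int) - 1 = ((k : Nat) : Int) by push_cast; ring]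
      rw [PySem.List.pyGetD_natCast, PySem.List.pyGetD_natCast]
      rw [List.getD_eq_getElem L 0 (by omega), List.getD_eq_getElem L 0 (by omega)]
      simp [Nat.add_comm]
  calc (PySem.List.pyRange 1 (L.length : Int) 1).foldl
        (fun ans i => max ans (PySem.List.pyGetD L i 0 - PySem.List.pyGetD L (i - 1) 0)) 0
      = ((PySem.List.pyRange 1 (L.length : Int) 1).map
          (fun i => PySem.List.pyGetD L i 0 - PySem.List.pyGetD L (i - 1) 0)).foldl max 0 := by
        rw [List.foldl_map]
    _ = (((L.drop 1).zip L).map (fun p => p.1 - p.2)).foldl max 0 := by rw [hmap]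
    _ = ((L.drop 1).zip L).foldl (fun ans p => max ans (p.1 - p.2)) 0 := by rw [List.foldl_map]

-- ===== VERDICT (by name: the statement is the Claim_ definition above) =====
set_option maxRecDepth 8000 in
theorem solve_spec : Claim_equal_solve := by
  intro n a _ hpre
  simp only [Spec_solve, solve, solve_alt]
  rw [foldl_pyRange_take (fun (st : List Int × Int) x =>
        (st.1 ++ [PySem.Int.mod (st.2 + x) 360], PySem.Int.mod (st.2 + x) 360)) a n hpre,
      foldl_pyRange_take (fun (st : PySem.Set Int × Int) x =>
        (PySem.Set.add st.1 (PySem.Int.mod (st.2 + x) 360), PySem.Int.mod (st.2 + x) 360)) a n hpre]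
  set t := a.take n.toNat with ht
  rw [foldA_eq, foldB_eq]
  set C := PySem.Set.update (PySem.Set.ofList [0, 360]) (prefs 0 t) with hC
  set S := PySem.List.sorted (PySem.Set.ofList (([0] ++ prefs 0 t) ++ [360])) (fun x => x) false with hS
  have hSpair : S.Pairwise (· < ·) := PySem.List.sorted_ofList_pairwise_lt _
  have hSnodup : S.Nodup := hSpair.imp (fun h => Int.ne_of_lt h)
  have hSmem : ∀ y, y ∈ S ↔ y ∈ ([0] ++ prefs 0 t) ++ [360] := by
    intro y
    rw [hS, PySem.List.mem_sorted, PySem.Set.mem_ofList]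
  have hCnodup : C.Nodup := PySem.Set.nodup_update _ _ (PySem.Set.nodup_ofList _)
  have hCmem : ∀ y, y ∈ C ↔ y ∈ ([0] ++ prefs 0 t) ++ [360] := by
    intro y
    rw [hC, PySem.Set.mem_update, PySem.Set.mem_ofList]
    simp only [List.mem_append, List.mem_cons, List.not_mem_nil, or_false]
    tauto
  have hperm : C.Perm S := (List.perm_ext_iff_of_nodup hCnodup hSnodup).2
    (fun y => (hCmem y).trans (hSmem y).symm)
  have hstepC : (fun (ans c : Int) =>
      match PySem.List.min? (C.filter (fun d => decide (c < d))) (fun x => x) with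
      | some nxt => max ans (nxt - c)
      | none => ans) = succF S := by
    funext ans c
    unfold succF
    rw [min?_val_eq (C.filter (fun d => decide (c < d))) (S.filter (fun d => decide (c < d)))
      (fun y => by simp only [List.mem_filter]; rw [hCmem y, hSmem y])]
  have hrc : RightCommutative (succF S) := ⟨by
    intro b c₁ c₂
    unfold succF
    cases PySem.List.min? (S.filter (fun d => decide (c₁ < d))) (fun x => x) <;>
      cases PySem.List.min? (S.filter (fun d => decide (c₂ < d))) (fun x => x) <;>
      (simp; try omega)⟩
  rw [hstepC, @List.Perm.foldl_eq _ _ (succF S) C S hrc hperm 0, succFold S hSpair 0, gapfoldA S]
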